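-- pv_equiv track=rewrite | github.com/halltape/HalltapePassBot | src/func_pass.py | check_corrected_pass
-- ===== SOURCE A (Python) =====
-- def check_corrected_pass(correct_pass) -> tuple[bool, bool]:
--     count, summ, duplicates_digits, duplicates_letters = 0, 0, False, False
--     # Функция считает количество подряд идущих цифр
--     for c in correct_pass:
--         if c in ('1234567890'):
--             count += 1
--             if count > 4:
--                 duplicates_digits = True
--         else:
--             count = 0
--
-- #  Функция считает количество подряд идущих символов
--     for i in range(1, len(correct_pass)):
--         if correct_pass[i] == correct_pass[i - 1]:
--             summ += 1
--             if summ > 2: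
--                 duplicates_letters = True
--         else:
--             summ = 0
--     return duplicates_digits, duplicates_letters
-- ===== SOURCE B (Python) =====
-- def check_corrected_pass(correct_pass) -> tuple[bool, bool]:
--     # single pass: one walk updating a digit-run counter and an equal-run counter together
--     duplicates_digits, duplicates_letters = False, False
--     count, summ = 0, 0
--     prev = None
--     for c in correct_pass:
--         if c in '1234567890':
--             count += 1
--         else:
--             count = 0
--         duplicates_digits = duplicates_digits or count > 4
--         if prev is not None:
--             if c == prev:
--                 summ += 1
--             else:
--                 summ = 0
--             duplicates_letters = duplicates_letters or summ > 2
--         prev = c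
--     return duplicates_digits, duplicates_letters
-- ===== Notes on version B (the rewrite author's own statement) =====
-- stated objective: alternative
-- what changed: A makes two separate scans (a for-loop over characters for digit runs, then an indexed range(1,len) loop for repeated-character runs); B walks the string once, carrying the previous character and updating both run counters and flags in a single pass.
import Mathlib
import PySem

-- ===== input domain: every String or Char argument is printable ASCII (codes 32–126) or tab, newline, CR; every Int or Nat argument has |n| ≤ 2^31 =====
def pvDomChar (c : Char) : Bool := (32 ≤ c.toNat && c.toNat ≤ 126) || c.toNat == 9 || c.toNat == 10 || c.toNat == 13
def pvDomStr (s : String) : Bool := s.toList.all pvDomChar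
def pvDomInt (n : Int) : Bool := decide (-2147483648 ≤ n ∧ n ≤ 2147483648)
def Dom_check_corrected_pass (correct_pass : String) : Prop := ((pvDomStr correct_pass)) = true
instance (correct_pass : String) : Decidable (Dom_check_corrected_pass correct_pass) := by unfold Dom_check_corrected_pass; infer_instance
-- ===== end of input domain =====

-- B merges A's two scans (digit loop + indexed adjacent-equality loop) into ONE pass carrying the previous character; same results, different decomposition.

-- ===== PORT A =====
-- step of A's first loop ("c in '1234567890'" on a single char = membership)
def pvDigitStep (st : Int × Bool) (c : Char) : Int × Bool :=
  if PySem.Chars.isIn [c] "1234567890".toList then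
    (st.1 + 1, if st.1 + 1 > 4 then true else st.2)
  else (0, st.2)

-- step of A's second loop (correct_pass[i] with 1 ≤ i < len, always in range, via pyGetD)
def pvIdxStep (l : List Char) (st : Int × Bool) (i : Int) : Int × Bool :=
  if PySem.List.pyGetD l i ' ' = PySem.List.pyGetD l (i - 1) ' ' then
    (st.1 + 1, if st.1 + 1 > 2 then true else st.2)
  else (0, st.2)

def check_corrected_pass (correct_pass : String) : Bool × Bool :=
  let l := correct_pass.toList
  ((l.foldl pvDigitStep (0, false)).2,
   ((PySem.List.pyRange 1 (l.length : Int) 1).foldl (pvIdxStep l) (0, false)).2)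

-- ===== PORT B =====
-- the single loop of Source B: prev is None before the first character
def pvGoB : List Char → Option Char → Int → Int → Bool → Bool → Bool × Bool
  | [], _, _, _, dd, dl => (dd, dl)
  | c :: rest, prev, count, summ, dd, dl =>
    let count' := if PySem.Chars.isIn [c] "1234567890".toList then count + 1 else 0
    let dd' := dd || decide (count' > 4)
    match prev with
    | none => pvGoB rest (some c) count' summ dd' dl
    | some p =>
      let summ' := if c = p then summ + 1 else 0
      pvGoB rest (some c) count' summ' dd' (dl || decide (summ' > 2))

def check_corrected_pass_alt (correct_pass : String) : Bool × Bool :=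
  pvGoB correct_pass.toList none 0 0 false false

-- ===== PRECONDITION & SPEC =====
def Spec_check_corrected_pass (correct_pass : String) (out : Bool × Bool) : Prop := out = check_corrected_pass_alt correct_pass
instance (correct_pass : String) (out : Bool × Bool) : Decidable (Spec_check_corrected_pass correct_pass out) := by unfold Spec_check_corrected_pass; infer_instance

-- ===== CLAIM (what is proved, stated in full; the proofs are below) =====
def Claim_equal_check_corrected_pass : Prop := ∀ (correct_pass : String), Dom_check_corrected_pass correct_pass → Spec_check_corrected_pass correct_pass (check_corrected_pass correct_pass)

-- ===== LEMMAS AND PROOFS =====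

-- proof-side view of A's second loop: a fold over adjacent (prev, cur) pairs
def pvPairStep (st : Int × Bool) (pc : Char × Char) : Int × Bool :=
  if pc.2 = pc.1 then
    (st.1 + 1, if st.1 + 1 > 2 then true else st.2)
  else (0, st.2)

-- shifting the index range by one step down the list
lemma pv_shift (a : Char) (u : List Char) (init : Int × Bool) :
    (PySem.List.pyRange 2 ((a :: u).length : Int) 1).foldl (pvIdxStep (a :: u)) init
      = (PySem.List.pyRange 1 ((u.length : Int)) 1).foldl (pvIdxStep u) init := by
  rw [PySem.List.pyRange_one, PySem.List.pyRange_one]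
  have hlen : (((a :: u).length : Int) - 2).toNat = (((u.length : Int)) - 1).toNat := by
    simp; omega
  rw [hlen]
  simp only [List.foldl_map]
  have hf : (fun (st : Int × Bool) (k : Nat) => pvIdxStep (a :: u) st (2 + (k : Int)))
      = (fun (st : Int × Bool) (k : Nat) => pvIdxStep u st (1 + (k : Int))) := by
    funext st k
    have h2 : (2 + (k : Int)) = ((k + 1 + 1 : Nat) : Int) := by omega
    have h1 : (2 + (k : Int) - 1) = ((k + 1 : Nat) : Int) := by omega
    have h1' : (1 + (k : Int)) = ((k + 1 : Nat) : Int) := by omega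
    have h0 : (1 + (k : Int) - 1) = ((k : Nat) : Int) := by omega
    simp only [pvIdxStep]
    rw [h1, h2, h0, h1']
    simp only [PySem.List.pyGetD_natCast, List.getD_cons_succ]
  rw [hf]

-- A's index loop over a :: t equals the pair fold over adjacent pairs
lemma pv_idx_zip : ∀ (t : List Char) (a : Char) (init : Int × Bool),
    (PySem.List.pyRange 1 (((a :: t).length : Int)) 1).foldl (pvIdxStep (a :: t)) init
      = ((a :: t).zip t).foldl pvPairStep init := by
  intro t
  induction t with
  | nil =>
    intro a init
    rw [PySem.List.pyRange_one_eq_nil (by simp)]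
    simp
  | cons b r ih =>
    intro a init
    rw [PySem.List.pyRange_one_cons (by exact_mod_cast Nat.lt_add_of_pos_left (Nat.succ_pos _))]
    simp only [List.foldl_cons]
    have hstep : pvIdxStep (a :: b :: r) init 1 = pvPairStep init (a, b) := by
      simp [pvIdxStep, pvPairStep, PySem.List.pyGetD]
    rw [hstep]
    have hone : (1 : Int) + 1 = 2 := by norm_num
    rw [hone]
    have hsh := pv_shift a (b :: r) (pvPairStep init (a, b))
    simp only [List.length_cons] at hsh ⊢
    have ih' := ih b (pvPairStep init (a, b))
    simp only [List.length_cons] at ih'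
    rw [hsh, ih']
    simp [List.zip]

-- the single pass equals the pair of the two folds
lemma pv_go_spec : ∀ (l : List Char) (p : Char) (cnt sm : Int) (dd dl : Bool),
    pvGoB l (some p) cnt sm dd dl
      = ((l.foldl pvDigitStep (cnt, dd)).2, (((p :: l).zip l).foldl pvPairStep (sm, dl)).2) := by
  intro l
  induction l with
  | nil => intro p cnt sm dd dl; simp [pvGoB]
  | cons c rest ih =>
    intro p cnt sm dd dl
    have hdig : pvDigitStep (cnt, dd) c
        = ((if PySem.Chars.isIn [c] "1234567890".toList then cnt + 1 else 0),
           dd || decide ((if PySem.Chars.isIn [c] "1234567890".toList then cnt + 1 else 0) > 4)) := by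
      simp only [pvDigitStep]
      split_ifs with h h4 <;> simp [*]
    have hpair : pvPairStep (sm, dl) (p, c)
        = ((if c = p then sm + 1 else 0),
           dl || decide ((if c = p then sm + 1 else 0) > 2)) := by
      simp only [pvPairStep]
      split_ifs with h h2 <;> simp [*]
    simp only [pvGoB, List.zip, List.zipWith_cons_cons, List.foldl_cons]
    rw [ih c, hdig, hpair]
    simp [List.zip]

-- ===== VERDICT (by name: the statement is the Claim_ definition above) =====
theorem check_corrected_pass_spec : Claim_equal_check_corrected_pass := by
  intro s _
  unfold Spec_check_corrected_pass check_corrected_pass check_corrected_pass_alt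
  cases h : s.toList with
  | nil => simp [pvGoB, PySem.List.pyRange_one_eq_nil]
  | cons a t =>
    simp only [pvGoB]
    rw [pv_go_spec, pv_idx_zip]
    have hdig : pvDigitStep (0, false) a
        = ((if PySem.Chars.isIn [a] "1234567890".toList then (0 : Int) + 1 else 0),
           false || decide ((if PySem.Chars.isIn [a] "1234567890".toList then (0 : Int) + 1 else 0) > 4)) := by
      simp only [pvDigitStep]
      split_ifs <;> simp_all
    simp only [List.foldl_cons]
    rw [hdig]
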